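-- pv_equiv track=rewrite | github.com/ethereum/research | defrag/send_bfs.py | count_coins_and_fragments
-- ===== SOURCE A (Python) =====
-- def count_coins_and_fragments(coins):
--     user_count = max(coins) + 1
--     coin_count = [0] * user_count
--     frag_count = [0] * user_count
--     for i in range(len(coins)):
--         coin_count[coins[i]] += 1
--         if i > 0 and coins[i] != coins[i-1]:
--             frag_count[coins[i]] += 1
--     return coin_count, frag_count
-- ===== SOURCE B (Python) =====
-- def count_coins_and_fragments(coins):
--     user_count = max(coins) + 1
--     coin_count = [0] * user_count
--     frag_count = [0] * user_count
--     i, n = 0, len(coins)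
--     first = True
--     while i < n:
--         v = coins[i]
--         j = i
--         while j < n and coins[j] == v:
--             j += 1
--         coin_count[v] += j - i
--         if not first:
--             frag_count[v] += 1
--         first = False
--         i = j
--     return coin_count, frag_count
-- ===== Notes on version B (the rewrite author's own statement) =====
-- stated objective: alternative
-- what changed: B replaces A's index-by-index for loop (which compares coins[i] with coins[i-1] at every position and increments per element) by a run-based two-level while traversal: the inner while finds each maximal run of equal values, the run's whole length is added to coin_count in one assignment, and frag_count is bumped once per run except the first (a 'first' flag instead of index comparisons).
import Mathlib
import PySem

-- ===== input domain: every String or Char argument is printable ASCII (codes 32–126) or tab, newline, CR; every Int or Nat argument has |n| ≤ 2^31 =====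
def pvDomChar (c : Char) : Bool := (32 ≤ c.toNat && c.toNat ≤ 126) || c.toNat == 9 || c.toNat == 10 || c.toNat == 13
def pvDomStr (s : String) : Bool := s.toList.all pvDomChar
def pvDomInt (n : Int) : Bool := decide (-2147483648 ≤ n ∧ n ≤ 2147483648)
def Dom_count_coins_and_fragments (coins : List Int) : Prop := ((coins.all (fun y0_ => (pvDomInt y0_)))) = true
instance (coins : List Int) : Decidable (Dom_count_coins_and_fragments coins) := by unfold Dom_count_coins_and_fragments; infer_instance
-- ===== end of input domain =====

-- B replaces A's per-element indexed scan by a run-based while traversal (one bulk add per run,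
-- a first-run flag instead of comparing coins[i] with coins[i-1]); objective: alternative.

-- shared primitive of both Pythons: 'xs[i] += d' on a list — negative i counts from the end;
-- out of range Python raises IndexError (those inputs are outside Pre_; the port leaves xs unchanged there)
def pyAddAt (xs : List Int) (i : Int) (d : Int) : List Int :=
  let j : Int := if i < 0 then i + xs.length else i
  if 0 ≤ j ∧ j < xs.length then xs.set j.toNat (xs.getD j.toNat 0 + d) else xs

-- ===== PORT A =====
def count_coins_and_fragments (coins : List Int) : List Int × List Int :=
  match PySem.List.max? coins (fun x => x) with
  | none => ([], [])  -- Python: max([]) raises ValueError (outside Pre_)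
  | some m =>
    let uc : Nat := (m + 1).toNat
    (List.range coins.length).foldl
      (fun st i =>
        let c := coins.getD i 0
        let cc := pyAddAt st.1 c 1
        let fc := if 0 < i ∧ c ≠ coins.getD (i - 1) 0 then pyAddAt st.2 c 1 else st.2
        (cc, fc))
      (List.replicate uc 0, List.replicate uc 0)

-- ===== PORT B =====
-- outer while of Source B: one step per run; the inner while scan 'j += 1 while coins[j] == v' is the
-- takeWhile/dropWhile split of the remaining suffix (j - i = length of the takeWhile part + 1).
def runsLoopL (l : List Int) (cc fc : List Int) (first : Bool) : List Int × List Int :=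
  match l with
  | [] => (cc, fc)
  | v :: rest =>
    let a := rest.takeWhile (fun x => x == v)
    let b := rest.dropWhile (fun x => x == v)
    let cc' := pyAddAt cc v ((a.length : Int) + 1)
    let fc' := if first then fc else pyAddAt fc v 1
    runsLoopL b cc' fc' false
termination_by l.length
decreasing_by
  exact Nat.lt_succ_of_le (List.length_dropWhile_le _ _)

def count_coins_and_fragments_alt (coins : List Int) : List Int × List Int :=
  match PySem.List.max? coins (fun x => x) with
  | none => ([], [])  -- Python: max([]) raises ValueError (outside Pre_)
  | some m =>
    let uc : Nat := (m + 1).toNat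
    runsLoopL coins (List.replicate uc 0) (List.replicate uc 0) true

-- ===== PRECONDITION & SPEC =====
-- Exactly where Python A returns: a nonempty list (max([]) raises ValueError) whose maximum is
-- ≥ 0 and whose every value c satisfies -(max+1) ≤ c (otherwise the index c into the lists of
-- length max+1 raises IndexError).  '∃ d ∈ coins, 0 ≤ d' says the maximum is ≥ 0, and
-- '∃ d ∈ coins, 0 ≤ c + d + 1' says c ≥ -(max+1), without computing the maximum.
def Pre_count_coins_and_fragments (coins : List Int) : Prop :=
  coins ≠ [] ∧ (∃ d ∈ coins, 0 ≤ d) ∧ ∀ c ∈ coins, ∃ d ∈ coins, 0 ≤ c + d + 1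
instance (coins : List Int) : Decidable (Pre_count_coins_and_fragments coins) := by
  unfold Pre_count_coins_and_fragments; infer_instance

def pvWitness_count_coins_and_fragments : List Int := [0, 1, 1, -2, 3]

def Spec_count_coins_and_fragments (coins : List Int) (out : List Int × List Int) : Prop := out = count_coins_and_fragments_alt coins
instance (coins : List Int) (out : List Int × List Int) : Decidable (Spec_count_coins_and_fragments coins out) := by unfold Spec_count_coins_and_fragments; infer_instance

-- ===== CLAIM (what is proved, stated in full; the proofs are below) =====
def Claim_equal_count_coins_and_fragments : Prop := ∀ (coins : List Int), Dom_count_coins_and_fragments coins → Pre_count_coins_and_fragments coins → Spec_count_coins_and_fragments coins (count_coins_and_fragments coins)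

-- ===== LEMMAS AND PROOFS =====

-- structural reference for A's loop: element-at-a-time with the previous value threaded through
def pairFold (p : Option Int) (l : List Int) (st : List Int × List Int) : List Int × List Int :=
  match l with
  | [] => st
  | x :: xs =>
    pairFold (some x) xs
      (pyAddAt st.1 x 1,
       match p with
       | none => st.2
       | some pv => if x ≠ pv then pyAddAt st.2 x 1 else st.2)

-- adding 0 at a Python index is a no-op (also out of range)
theorem pyAddAt_zero (xs : List Int) (i : Int) : pyAddAt xs i 0 = xs := by
  unfold pyAddAt
  dsimp only
  set j : Int := if i < 0 then i + (xs.length : Int) else i with hj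
  by_cases hr : 0 ≤ j ∧ j < (xs.length : Int)
  · have hjn : j.toNat < xs.length := by omega
    rw [if_pos hr, add_zero, List.getD_eq_getElem _ _ hjn, List.set_getElem_self]
  · rw [if_neg hr]

-- two additions at the same Python index collapse (also when out of range: both are no-ops)
theorem pyAddAt_pyAddAt (xs : List Int) (i d1 d2 : Int) :
    pyAddAt (pyAddAt xs i d1) i d2 = pyAddAt xs i (d1 + d2) := by
  by_cases hr : 0 ≤ (if i < 0 then i + (xs.length : Int) else i) ∧
      (if i < 0 then i + (xs.length : Int) else i) < (xs.length : Int)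
  · have h1 : pyAddAt xs i d1 =
        xs.set (if i < 0 then i + (xs.length : Int) else i).toNat
          (xs.getD (if i < 0 then i + (xs.length : Int) else i).toNat 0 + d1) := by
      unfold pyAddAt; dsimp only; rw [if_pos hr]
    rw [h1]
    unfold pyAddAt
    dsimp only
    rw [List.length_set]
    rw [if_pos hr, if_pos hr]
    have hjn : (if i < 0 then i + (xs.length : Int) else i).toNat < xs.length := by
      rcases hr with ⟨h1', h2'⟩; omega
    set jn : Nat := (if i < 0 then i + (xs.length : Int) else i).toNat with hjdef
    have hg2 : (xs.set jn (xs.getD jn 0 + d1)).getD jn 0 = xs.getD jn 0 + d1 := by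
      rw [List.getD_eq_getElem _ _ (by rw [List.length_set]; exact hjn), List.getElem_set_self]
    rw [hg2, List.set_set, add_assoc]
  · have h1 : pyAddAt xs i d1 = xs := by
      unfold pyAddAt; dsimp only; rw [if_neg hr]
    rw [h1]
    unfold pyAddAt
    dsimp only
    rw [if_neg hr, if_neg hr]

-- a constant run processed element-wise by pairFold is one bulk addition
theorem pairFold_run (a : List Int) (v : Int) : ∀ (b : List Int) (st : List Int × List Int),
    (∀ x ∈ a, x = v) →
    pairFold (some v) (a ++ b) st =
      pairFold (some v) b (pyAddAt st.1 v (a.length : Int), st.2) := by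
  induction a with
  | nil =>
    intro b st _
    simp [pyAddAt_zero]
  | cons x xs ih =>
    intro b st h
    have hx : x = v := h x (by simp)
    subst hx
    have hstep : pairFold (some x) ((x :: xs) ++ b) st =
        pairFold (some x) (xs ++ b) (pyAddAt st.1 x 1, st.2) := by
      show pairFold (some x) (xs ++ b)
          (pyAddAt st.1 x 1, if x ≠ x then pyAddAt st.2 x 1 else st.2) = _
      rw [if_neg (by simp)]
    rw [hstep, ih b _ (fun y hy => h y (by simp [hy])), pyAddAt_pyAddAt]
    have : (1 : Int) + (xs.length : Int) = ((x :: xs).length : Int) := by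
      simp; ring
    rw [this]

-- the element-wise fold equals the run-based loop: first = true corresponds to no previous value,
-- first = false to a previous value z different from the head of the remaining suffix
theorem pairFold_eq_runsLoopL (n : Nat) : ∀ (l : List Int), l.length ≤ n →
    ∀ (cc fc : List Int),
    (pairFold none l (cc, fc) = runsLoopL l cc fc true) ∧
    (∀ z : Int, (∀ w ∈ l.head?, w ≠ z) →
      pairFold (some z) l (cc, fc) = runsLoopL l cc fc false) := by
  induction n with
  | zero =>
    intro l hl cc fc
    have : l = [] := by cases l <;> simp_all
    subst this
    exact ⟨by simp [pairFold, runsLoopL], fun z _ => by simp [pairFold, runsLoopL]⟩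
  | succ n ih =>
    intro l hl cc fc
    cases l with
    | nil => exact ⟨by simp [pairFold, runsLoopL], fun z _ => by simp [pairFold, runsLoopL]⟩
    | cons v rest =>
      have hsplit : rest = rest.takeWhile (fun x => x == v) ++ rest.dropWhile (fun x => x == v) :=
        (List.takeWhile_append_dropWhile).symm
      have hta : ∀ x ∈ rest.takeWhile (fun x => x == v), x = v := by
        intro x hx
        have := List.mem_takeWhile_imp hx
        simpa using this
      have hlen : (rest.dropWhile (fun x => x == v)).length ≤ n := by
        have := List.length_dropWhile_le (fun x => x == v) rest; simp at hl; omega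
      have hhead : ∀ w ∈ (rest.dropWhile (fun x => x == v)).head?, w ≠ v := by
        intro w hw
        have hnp := List.head?_dropWhile_not (fun x => x == v) rest
        rw [Option.mem_def] at hw
        rw [hw] at hnp
        simpa using hnp
      have hcollapse : ∀ st2 : List Int,
          pairFold (some v) rest (pyAddAt cc v 1, st2) =
            runsLoopL (rest.dropWhile (fun x => x == v))
              (pyAddAt cc v (((rest.takeWhile (fun x => x == v)).length : Int) + 1)) st2 false := by
        intro st2
        conv_lhs => rw [hsplit]
        rw [pairFold_run _ v _ _ hta, pyAddAt_pyAddAt]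
        rw [(ih _ hlen _ st2).2 v hhead]
        have : ((rest.takeWhile (fun x => x == v)).length : Int) + 1 =
            1 + ((rest.takeWhile (fun x => x == v)).length : Int) := by ring
        rw [this]
      constructor
      · have hstep : pairFold none (v :: rest) (cc, fc) =
            pairFold (some v) rest (pyAddAt cc v 1, fc) := rfl
        rw [hstep, hcollapse fc, runsLoopL]
        rw [if_pos rfl]
      · intro z hz
        have hvz : v ≠ z := hz v (by simp)
        have hstep : pairFold (some z) (v :: rest) (cc, fc) =
            pairFold (some v) rest (pyAddAt cc v 1, pyAddAt fc v 1) := by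
          show pairFold (some v) rest
              (pyAddAt cc v 1, if v ≠ z then pyAddAt fc v 1 else fc) = _
          rw [if_pos hvz]
        rw [hstep, hcollapse (pyAddAt fc v 1), runsLoopL]
        rw [if_neg (by simp)]

-- A's indexed loop body, named so the range'-fold can be stated
def stepA (coins : List Int) (st : List Int × List Int) (i : Nat) : List Int × List Int :=
  let c := coins.getD i 0
  let cc := pyAddAt st.1 c 1
  let fc := if 0 < i ∧ c ≠ coins.getD (i - 1) 0 then pyAddAt st.2 c 1 else st.2
  (cc, fc)

theorem rangeFold_eq_pairFold (l : List Int) : ∀ (pre : List Int) (st : List Int × List Int),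
    (List.range' pre.length l.length).foldl (stepA (pre ++ l)) st = pairFold pre.getLast? l st := by
  induction l with
  | nil => intro pre st; simp [pairFold]
  | cons x xs ih =>
    intro pre st
    simp only [List.length_cons]
    rw [List.range'_succ, List.foldl_cons]
    have hget : (pre ++ x :: xs).getD pre.length 0 = x := by
      rw [List.getD_append_right _ _ _ _ (le_refl _)]
      simp
    have hstep : stepA (pre ++ x :: xs) st pre.length =
        (pyAddAt st.1 x 1,
         match pre.getLast? with
         | none => st.2
         | some pv => if x ≠ pv then pyAddAt st.2 x 1 else st.2) := by
      unfold stepA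
      dsimp only
      rw [hget]
      rcases pre with _ | ⟨y, ys⟩
      · simp
      · have hne : (y :: ys) ≠ [] := by simp
        have hprev : ((y :: ys) ++ x :: xs).getD ((y :: ys).length - 1) 0 =
            (y :: ys).getLast hne := by
          rw [List.getD_append _ _ _ _ (by simp)]
          rw [List.getLast_eq_getElem hne, List.getD_eq_getElem _ _ (by simp)]
          rfl
        rw [hprev, List.getLast?_eq_some_getLast hne]
        dsimp only
        by_cases hc : x ≠ (y :: ys).getLast hne
        · rw [if_pos ⟨by simp, hc⟩, if_pos hc]
        · rw [if_neg (by simp [hc]), if_neg hc]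
    rw [hstep]
    have happ : pre ++ x :: xs = (pre ++ [x]) ++ xs := by simp
    have hlen : pre.length + 1 = (pre ++ [x]).length := by simp
    rw [happ, hlen, ih (pre ++ [x]), List.getLast?_concat]
    rfl

-- ===== VERDICT (by name: the statement is the Claim_ definition above) =====
theorem count_coins_and_fragments_spec : Claim_equal_count_coins_and_fragments := by
  intro coins _ _
  unfold Spec_count_coins_and_fragments
  unfold count_coins_and_fragments count_coins_and_fragments_alt
  cases hm : PySem.List.max? coins (fun x => x) with
  | none => rfl
  | some m =>
    dsimp only
    have hA : (List.range coins.length).foldl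
        (fun st i =>
          let c := coins.getD i 0
          let cc := pyAddAt st.1 c 1
          let fc := if 0 < i ∧ c ≠ coins.getD (i - 1) 0 then pyAddAt st.2 c 1 else st.2
          (cc, fc))
        (List.replicate (m + 1).toNat 0, List.replicate (m + 1).toNat 0)
        = pairFold none coins (List.replicate (m + 1).toNat 0, List.replicate (m + 1).toNat 0) := by
      rw [List.range_eq_range']
      exact rangeFold_eq_pairFold coins [] _
    rw [hA]
    exact (pairFold_eq_runsLoopL coins.length coins (le_refl _) _ _).1
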